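-- pv_equiv track=rewrite | github.com/ashwinkumar03/notion-carry-forward-new | task-automation.py | find_category_boundaries
-- ===== SOURCE A (Python) =====
-- from typing import Dict, List, Tuple
--
-- def find_category_boundaries(rich_text_blocks: List[dict]) -> List[Tuple[str, int, int]]:
--     """Find the start and end indices of each category in the rich text blocks."""
--     categories = []
--     current_start = None
--     current_category = None
--
--     for i, block in enumerate(rich_text_blocks):
--         text = block.get('plain_text', '').strip()
--
--         if text in ["DAILY CONSUMPTION", "MUST", "TIME PERMITTING"]:
--             if current_category:
--                 categories.append((current_category, current_start, i - 1))
--             current_category = text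
--             current_start = i
--
--     if current_category and current_start is not None:
--         categories.append((current_category, current_start, len(rich_text_blocks) - 1))
--
--     return categories
-- ===== SOURCE B (Python) =====
-- def find_category_boundaries(rich_text_blocks):
--     CATS = ("DAILY CONSUMPTION", "MUST", "TIME PERMITTING")
--     markers = [(b.get('plain_text', '').strip(), i)
--                for i, b in enumerate(rich_text_blocks)
--                if b.get('plain_text', '').strip() in CATS]
--     if not markers:
--         return []
--     result = [(t, i, j - 1) for (t, i), (_, j) in zip(markers, markers[1:])]
--     t, i = markers[-1]
--     result.append((t, i, len(rich_text_blocks) - 1))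
--     return result
-- ===== Notes on version B (the rewrite author's own statement) =====
-- stated objective: alternative
-- what changed: Replaces A's single stateful scan (carrying current_category/current_start and emitting on the next marker and after the loop) with a two-pass decomposition: build a marker index table (text, i) in one pass, then assemble boundaries by pairing adjacent markers, the last one closing at len-1.
import Mathlib
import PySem

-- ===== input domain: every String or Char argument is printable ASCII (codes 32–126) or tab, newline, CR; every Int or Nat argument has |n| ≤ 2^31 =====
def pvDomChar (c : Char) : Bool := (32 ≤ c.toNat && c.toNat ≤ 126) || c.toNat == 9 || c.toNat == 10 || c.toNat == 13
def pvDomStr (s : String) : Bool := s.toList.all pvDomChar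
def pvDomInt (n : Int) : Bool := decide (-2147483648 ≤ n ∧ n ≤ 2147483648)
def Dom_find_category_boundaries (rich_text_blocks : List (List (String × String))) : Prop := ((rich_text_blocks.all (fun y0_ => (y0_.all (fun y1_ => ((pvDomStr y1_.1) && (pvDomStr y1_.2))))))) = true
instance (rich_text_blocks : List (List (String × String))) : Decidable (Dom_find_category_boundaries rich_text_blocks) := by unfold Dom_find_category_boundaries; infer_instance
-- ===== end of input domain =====

-- B replaces A's stateful scan (pending category + start carried through one loop) by a marker-index
-- table built in one pass and an adjacent-pairing pass over it; objective: alternative decomposition.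

-- shared helpers: block.get('plain_text','').strip() and the category membership test
def catText (b : List (String × String)) : String :=
  PySem.Str.strip ((PySem.Dict.mk b).getD "plain_text" "")

def isCat (t : String) : Bool :=
  t == "DAILY CONSUMPTION" || t == "MUST" || t == "TIME PERMITTING"

-- ===== PORT A =====
-- loop body of A's for-loop; state = (categories, current_start, current_category)
def stepA (st : List (String × Int × Int) × Option Int × Option String)
    (p : Int × List (String × String)) :
    List (String × Int × Int) × Option Int × Option String :=
  let text := catText p.2
  if isCat text then
    let categories :=
      match st.2.2, st.2.1 with   -- `if current_category:` = truthy (some, nonempty)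
      | some c, some s => if c ≠ "" then st.1 ++ [(c, s, p.1 - 1)] else st.1
      | _, _ => st.1
    (categories, some p.1, some text)
  else st

-- A's post-loop append: `if current_category and current_start is not None:`
def finiA (n : Int) (st : List (String × Int × Int) × Option Int × Option String) :
    List (String × Int × Int) :=
  match st.2.2, st.2.1 with
  | some c, some s => if c ≠ "" then st.1 ++ [(c, s, n - 1)] else st.1
  | _, _ => st.1

def find_category_boundaries (rich_text_blocks : List (List (String × String))) :
    List (String × Int × Int) :=
  finiA (rich_text_blocks.length : Int)
    ((PySem.List.enumerate rich_text_blocks 0).foldl stepA ([], none, none))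

-- ===== PORT B =====
def find_category_boundaries_alt (rich_text_blocks : List (List (String × String))) :
    List (String × Int × Int) :=
  let markers := (PySem.List.enumerate rich_text_blocks 0).filterMap
      (fun p => let t := catText p.2; if isCat t then some (t, p.1) else none)
  match markers with
  | [] => []
  | _ :: tl =>
      (markers.zip tl).map (fun q => (q.1.1, q.1.2, q.2.2 - 1)) ++
        [(let m := PySem.List.pyGetD markers (-1) ("", 0);
          (m.1, m.2, (rich_text_blocks.length : Int) - 1))]

-- ===== PRECONDITION & SPEC =====
def Spec_find_category_boundaries (rich_text_blocks : List (List (String × String))) (out : List (String × Int × Int)) : Prop := out = find_category_boundaries_alt rich_text_blocks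
instance (rich_text_blocks : List (List (String × String))) (out : List (String × Int × Int)) : Decidable (Spec_find_category_boundaries rich_text_blocks out) := by unfold Spec_find_category_boundaries; infer_instance

-- ===== CLAIM (what is proved, stated in full; the proofs are below) =====
def Claim_equal_find_category_boundaries : Prop := ∀ (rich_text_blocks : List (List (String × String))), Dom_find_category_boundaries rich_text_blocks → Spec_find_category_boundaries rich_text_blocks (find_category_boundaries rich_text_blocks)

-- ===== LEMMAS AND PROOFS =====

-- the marker table B builds
def markersF (l : List (Int × List (String × String))) : List (String × Int) :=
  l.filterMap (fun p => let t := catText p.2; if isCat t then some (t, p.1) else none)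

-- common normal form: assemble the result from the pending marker and the remaining markers
def finish (n : Int) : Option (String × Int) → List (String × Int) → List (String × Int × Int)
  | none, [] => []
  | none, m :: ms => finish n (some m) ms
  | some (c, s), [] => [(c, s, n - 1)]
  | some (c, s), (t, i) :: ms => (c, s, i - 1) :: finish n (some (t, i)) ms

theorem isCat_ne_empty {t : String} (h : isCat t = true) : t ≠ "" := by
  unfold isCat at h
  simp only [Bool.or_eq_true, beq_iff_eq] at h
  rcases h with (rfl | rfl) | rfl <;> decide

theorem scanA_eq_finish (n : Int) :
    ∀ (l : List (Int × List (String × String))) (acc : List (String × Int × Int))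
      (cur : Option (String × Int)),
      (∀ c s, cur = some (c, s) → isCat c = true) →
      finiA n (l.foldl stepA (acc, cur.map (·.2), cur.map (·.1))) =
        acc ++ finish n cur (markersF l) := by
  intro l
  induction l with
  | nil =>
      intro acc cur h
      match cur with
      | none => simp [finiA, finish, markersF]
      | some (c, s) =>
          simp [finiA, finish, markersF, isCat_ne_empty (h c s rfl)]
  | cons p l ih =>
      intro acc cur h
      obtain ⟨i, b⟩ := p
      by_cases hc : isCat (catText b)
      · match cur with
        | none =>
            have := ih acc (some (catText b, i)) (by intro c s hcs; cases hcs; exact hc)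
            simpa [stepA, markersF, finish, hc] using this
        | some (c, s) =>
            have hcc := h c s rfl
            have := ih (acc ++ [(c, s, i - 1)]) (some (catText b, i))
              (by intro c' s' hcs; cases hcs; exact hc)
            simp only [List.foldl_cons, stepA, hc, if_pos, Option.map_some,
              isCat_ne_empty hcc, ne_eq, not_false_eq_true] at this ⊢
            simp [markersF, finish, hc, this]
      · have := ih acc cur h
        simp [stepA, markersF, hc, this]

theorem pairing_eq_finish (n : Int) :
    ∀ (ms : List (String × Int)) (m : String × Int),
      (((m :: ms).zip ms).map (fun q => (q.1.1, q.1.2, q.2.2 - 1)) ++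
        [(let l := PySem.List.pyGetD (m :: ms) (-1) ("", 0);
          (l.1, l.2, n - 1))]) = finish n (some m) ms := by
  intro ms
  induction ms with
  | nil => intro m; simp [finish, PySem.List.pyGetD, PySem.List.pyGet?, PySem.List.pyIdx?]
  | cons m2 ms ih =>
      intro m
      obtain ⟨c, s⟩ := m
      obtain ⟨t, i⟩ := m2
      have hlast : PySem.List.pyGetD ((c, s) :: (t, i) :: ms) (-1) ("", 0) =
          PySem.List.pyGetD ((t, i) :: ms) (-1) ("", 0) := by
        rw [PySem.List.pyGetD_neg_one ((c, s) :: (t, i) :: ms) ("", 0) (by simp),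
          PySem.List.pyGetD_neg_one ((t, i) :: ms) ("", 0) (by simp), List.getLast_cons]
      simp only [List.zip_cons_cons, List.map_cons, finish, ← ih (t, i), hlast]
      simp

-- ===== VERDICT (by name: the statement is the Claim_ definition above) =====
theorem find_category_boundaries_spec : Claim_equal_find_category_boundaries := by
  intro blocks _
  unfold Spec_find_category_boundaries find_category_boundaries find_category_boundaries_alt
  have hA := scanA_eq_finish (blocks.length : Int) (PySem.List.enumerate blocks 0) [] none
    (by intro c s h; cases h)
  simp only [Option.map_none, List.nil_append] at hA
  rw [hA]
  show finish _ none (markersF (PySem.List.enumerate blocks 0)) = _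
  cases hq : (PySem.List.enumerate blocks 0).filterMap
      (fun p => let t := catText p.2; if isCat t then some (t, p.1) else none) with
  | nil =>
      rw [show markersF (PySem.List.enumerate blocks 0) = [] from hq]
      simp only [finish]
  | cons m ms =>
      rw [show markersF (PySem.List.enumerate blocks 0) = m :: ms from hq]
      simp only [finish]
      exact (pairing_eq_finish (blocks.length : Int) ms m).symm
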